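-- pv_equiv track=rewrite | github.com/Zo3rb/studies2025 | DSA/Arrays/05 - Challenge: Rearrange Positive & Negative Values/concating_solution.py | rearrange_values
-- ===== SOURCE A (Python) =====
-- from typing import List
--
-- def rearrange_values(lst: List[int]) -> List[int]:
--     """
--     Rearranges the input list so that all negative numbers appear before all
--     non-negative numbers (including zero). The relative order of elements is
--     not required to be preserved.
--
--     Args:
--         lst (List[int]): A list of integers.
--
--     Returns:
--         List[int]: A list with all negative numbers on the left and non-negative
--                    numbers on the right.
--     """
--     negative_values = []
--     non_negative_values = []
--
--     for num in lst:
--         if num < 0: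
--             negative_values.append(num)
--         else:
--             non_negative_values.append(num)
--
--     # Combine the two lists: negative values first, followed by non-negative
--     return negative_values + non_negative_values
-- ===== SOURCE B (Python) =====
-- from typing import List
--
-- def rearrange_values(lst: List[int]) -> List[int]:
--     # Stable sort on a 0/1 sign key: negatives (key 0) come first,
--     # non-negatives (key 1) after, each group keeping its original order.
--     return sorted(lst, key=lambda x: 0 if x < 0 else 1)
-- ===== Notes on version B (the rewrite author's own statement) =====
-- stated objective: idiomatic
-- what changed: Replaced the explicit two-list partition-and-concatenate loop with a single stable sort on a 0/1 sign key, whose stability preserves the within-group order.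
import Mathlib
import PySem

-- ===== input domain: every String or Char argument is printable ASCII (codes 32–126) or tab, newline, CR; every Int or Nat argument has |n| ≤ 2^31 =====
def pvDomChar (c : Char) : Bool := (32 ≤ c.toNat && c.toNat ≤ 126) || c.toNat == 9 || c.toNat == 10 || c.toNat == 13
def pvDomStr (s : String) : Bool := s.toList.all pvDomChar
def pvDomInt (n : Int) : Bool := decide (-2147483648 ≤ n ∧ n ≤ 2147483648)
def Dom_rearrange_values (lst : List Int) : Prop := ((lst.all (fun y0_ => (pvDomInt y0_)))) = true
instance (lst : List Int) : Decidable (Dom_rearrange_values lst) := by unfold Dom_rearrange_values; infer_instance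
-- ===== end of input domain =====

-- B replaces A's two-list partition-and-concatenate loop with one stable sort on a 0/1 sign key (idiomatic).

-- ===== PORT A =====
def rearrange_values (lst : List Int) : List Int :=
  let p : List Int × List Int :=
    lst.foldl (fun acc num =>
      if num < 0 then (acc.1 ++ [num], acc.2) else (acc.1, acc.2 ++ [num]))
      ([], [])
  p.1 ++ p.2

-- ===== PORT B =====
def rearrange_values_alt (lst : List Int) : List Int :=
  PySem.List.sorted lst (fun x => if x < 0 then (0 : Int) else 1) false

-- ===== PRECONDITION & SPEC =====
def Spec_rearrange_values (lst : List Int) (out : List Int) : Prop := out = rearrange_values_alt lst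
instance (lst : List Int) (out : List Int) : Decidable (Spec_rearrange_values lst out) := by unfold Spec_rearrange_values; infer_instance

-- ===== CLAIM (what is proved, stated in full; the proofs are below) =====
def Claim_equal_rearrange_values : Prop := ∀ (lst : List Int), Dom_rearrange_values lst → Spec_rearrange_values lst (rearrange_values lst)

-- ===== LEMMAS AND PROOFS =====

-- the comparison PySem.List.sorted uses for B's key
def pvBefore (a b : Int) : Bool :=
  decide ((if a < 0 then (0 : Int) else 1) < (if b < 0 then (0 : Int) else 1))

theorem pvBefore_neg_neg {a b : Int} (ha : a < 0) (hb : b < 0) : pvBefore a b = false := by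
  simp [pvBefore, ha, hb]

theorem pvBefore_nonneg {a b : Int} (ha : ¬ a < 0) : pvBefore a b = false := by
  by_cases hb : b < 0 <;> simp [pvBefore, ha, hb] <;> omega

theorem pvBefore_neg_nonneg {a b : Int} (ha : a < 0) (hb : ¬ b < 0) : pvBefore a b = true := by
  simp [pvBefore, ha, hb]

-- x is inserted past a prefix it never goes before
theorem insertBy_skip (x : Int) (l r : List Int)
    (h : ∀ y ∈ l, pvBefore x y = false) :
    PySem.List.insertBy pvBefore x (l ++ r) = l ++ PySem.List.insertBy pvBefore x r := by
  induction l with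
  | nil => rfl
  | cons y ys ih =>
    have hy := h y (by simp)
    simp [PySem.List.insertBy, hy, ih (fun z hz => h z (by simp [hz]))]

-- x goes in front of a list it goes before everywhere
theorem insertBy_front (x : Int) (l : List Int)
    (h : ∀ y ∈ l, pvBefore x y = true) :
    PySem.List.insertBy pvBefore x l = x :: l := by
  cases l with
  | nil => rfl
  | cons y ys => simp [PySem.List.insertBy, h y (by simp)]

-- A's loop extends the two accumulators by the filtered halves
theorem foldl_partition (xs : List Int) (neg pos : List Int) :
    xs.foldl (fun acc num =>
      if num < 0 then (acc.1 ++ [num], acc.2) else (acc.1, acc.2 ++ [num])) (neg, pos)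
    = (neg ++ xs.filter (fun x => decide (x < 0)),
       pos ++ xs.filter (fun x => !decide (x < 0))) := by
  induction xs generalizing neg pos with
  | nil => simp
  | cons x xs ih =>
    by_cases hx : x < 0 <;> simp [List.foldl_cons, hx, ih, List.filter_cons]

-- B's insertion sort keeps a partitioned accumulator partitioned
theorem foldl_insert_partition (xs : List Int) (neg pos : List Int)
    (hn : ∀ y ∈ neg, y < 0) (hp : ∀ y ∈ pos, ¬ y < 0) :
    xs.foldl (fun acc x => PySem.List.insertBy pvBefore x acc) (neg ++ pos)
    = (neg ++ xs.filter (fun x => decide (x < 0)))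
      ++ (pos ++ xs.filter (fun x => !decide (x < 0))) := by
  induction xs generalizing neg pos with
  | nil => simp
  | cons x xs ih =>
    rw [List.foldl_cons]
    by_cases hx : x < 0
    · have hstep : PySem.List.insertBy pvBefore x (neg ++ pos) = (neg ++ [x]) ++ pos := by
        rw [insertBy_skip x neg pos (fun y hy => pvBefore_neg_neg hx (hn y hy)),
            insertBy_front x pos (fun y hy => pvBefore_neg_nonneg hx (hp y hy))]
        simp
      rw [hstep, ih (neg ++ [x]) pos
            (by intro y hy; rcases List.mem_append.1 hy with h | h
                · exact hn y h
                · simp at h; omega) hp]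
      simp [hx]
    · have hstep : PySem.List.insertBy pvBefore x (neg ++ pos) = neg ++ (pos ++ [x]) := by
        have := insertBy_skip x (neg ++ pos) []
          (fun y _ => pvBefore_nonneg hx)
        simpa [PySem.List.insertBy] using this
      rw [hstep, ih neg (pos ++ [x]) hn
            (by intro y hy; rcases List.mem_append.1 hy with h | h
                · exact hp y h
                · simp at h; omega)]
      simp [hx]

-- ===== VERDICT (by name: the statement is the Claim_ definition above) =====
theorem rearrange_values_spec : Claim_equal_rearrange_values := by
  intro lst _
  unfold Spec_rearrange_values rearrange_values rearrange_values_alt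
  rw [PySem.List.sorted_eq_foldl_insertBy]
  have hb : (fun acc (x : Int) => PySem.List.insertBy
      (fun a b => decide ((if a < 0 then (0 : Int) else 1) < if b < 0 then (0 : Int) else 1)) x acc)
      = fun acc x => PySem.List.insertBy pvBefore x acc := rfl
  rw [hb]
  have := foldl_insert_partition lst [] [] (by simp) (by simp)
  simp only [List.nil_append] at this
  rw [this, foldl_partition lst [] []]
  simp
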